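-- pv_equiv track=rewrite | github.com/TanishSinghTak/COL100-assignments | Assignment5/ass 5.py | stringProblem
-- ===== SOURCE A (Python) =====
-- def stringProblem(A,B):
--     m = len(A)
--     n = len(B)
--     vowel = ['a','e','i','o','u']
--     #table for storing data of subproblems
--     edit = [[0 for x in range(n + 1)] for x in range(m + 1)]
--     # INV2: we have our matrix filled with every row till i'th row with their min values
--     for i in range(m + 1):
--         # INV1: for given ith row of matrix we get it completed till its j'th element
--         # with every element having it's lowest value
--         for j in range(n + 1):
--             # If first string is empty, we will insert all characters of second string
--             if i == 0:
--                 edit[i][j] = j #it will take j steps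
--             # If second string is empty, we will remove all characters of first string
--             elif j == 0:
--                 edit[i][j] = i #it will take i steps
--             # If last characters are same, we don't need to add any step
--             elif A[i-1] == B[j-1]:
--                 edit[i][j] = edit[i-1][j-1]
--             # If last character are different, we will see every case and add a step in the min case
--             # case 1 if char of A is not a vowel or characters of both A and B are vowels we have 3 cases
--             elif A[i-1] not in vowel or A[i-1] in vowel and B[j-1] in vowel:
--                 edit[i][j] = 1 + min(edit[i][j-1],edit[i-1][j],edit[i-1][j-1])
--                             #3 cases: insert^      remove^     replace^
--             # case 2 if char of A is a vowel and char of B is a consonant then we have 2 cases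
--             # as we can not replace a vowel with a consonant
--             elif A[i-1] in vowel and B[j-1] not in vowel:
--                 edit[i][j] = 1 + min(edit[i][j-1],edit[i-1][j])
--                             #2 cases: insert^     remove^
--     return edit[m][n]
-- ===== SOURCE B (Python) =====
-- def stringProblem(A, B):
--     # Demand-driven evaluation: an explicit post-order stack (iterative
--     # depth-first traversal of the dependency DAG from (m, n)) with a memo
--     # dict -- only cells the answer actually depends on are ever computed,
--     # instead of tabulating the whole (m+1) x (n+1) matrix.
--     vowels = frozenset('aeiou')
--     m, n = len(A), len(B)
--     memo = {}
--     stack = [(m, n, False)]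
--     while stack:
--         i, j, expanded = stack.pop()
--         if (i, j) in memo:
--             continue
--         if i == 0:
--             memo[i, j] = j
--             continue
--         if j == 0:
--             memo[i, j] = i
--             continue
--         ca, cb = A[i - 1], B[j - 1]
--         if ca == cb:
--             deps = [(i - 1, j - 1)]
--         elif ca not in vowels or cb in vowels:
--             deps = [(i, j - 1), (i - 1, j), (i - 1, j - 1)]
--         else:
--             deps = [(i, j - 1), (i - 1, j)]
--         if expanded:
--             if ca == cb:
--                 memo[i, j] = memo[i - 1, j - 1]
--             else:
--                 memo[i, j] = 1 + min(memo[d] for d in deps)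
--         else:
--             stack.append((i, j, True))
--             stack.extend(d + (False,) for d in deps if d not in memo)
--     return memo[m, n]
-- ===== Notes on version B (the rewrite author's own statement) =====
-- stated objective: alternative
-- what changed: Replaces A's bottom-up tabulation of the full (m+1)x(n+1) edit matrix with a demand-driven iterative depth-first traversal of the dependency DAG from (m,n): an explicit post-order stack with expansion flags plus a memo dict, so only cells the answer actually depends on are ever computed (e.g. just one cell per character pair when the strings match).
import Mathlib
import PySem

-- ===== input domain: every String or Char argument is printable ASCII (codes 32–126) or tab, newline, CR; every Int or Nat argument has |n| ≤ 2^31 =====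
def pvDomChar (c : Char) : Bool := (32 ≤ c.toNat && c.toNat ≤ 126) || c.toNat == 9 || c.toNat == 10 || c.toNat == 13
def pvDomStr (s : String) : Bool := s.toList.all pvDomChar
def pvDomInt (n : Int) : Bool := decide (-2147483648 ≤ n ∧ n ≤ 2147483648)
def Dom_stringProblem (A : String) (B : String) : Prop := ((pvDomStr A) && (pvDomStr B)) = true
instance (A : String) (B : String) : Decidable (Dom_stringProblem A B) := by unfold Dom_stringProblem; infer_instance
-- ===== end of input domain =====

-- B replaces A's bottom-up tabulation of the full (m+1)×(n+1) matrix by a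
-- demand-driven depth-first traversal of the dependency DAG from (m,n) — an
-- explicit post-order stack with a memo dict, computing only needed cells
-- (objective: alternative; return value only, neither version mutates input).

-- ===== PORT A =====
-- A's vowel list
def pvVowelA : List Char := ['a', 'e', 'i', 'o', 'u']

-- edit[i][j] (indices are always in range in A, so List.getD is exact)
def pvReadA (ed : List (List Int)) (i j : Nat) : Int := (ed.getD i []).getD j 0

-- edit[i][j] = v (in-range assignment, List.set is exact)
def pvWriteA (ed : List (List Int)) (i j : Nat) (v : Int) : List (List Int) :=
  ed.set i ((ed.getD i []).set j v)

-- the body of A's inner loop: the if/elif chain assigning edit[i][j]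
def pvStepA (a b : List Char) (ed : List (List Int)) (i j : Nat) : List (List Int) :=
  if i = 0 then pvWriteA ed i j (j : Int)
  else if j = 0 then pvWriteA ed i j (i : Int)
  else if a.getD (i-1) ' ' = b.getD (j-1) ' ' then
    pvWriteA ed i j (pvReadA ed (i-1) (j-1))
  else if a.getD (i-1) ' ' ∉ pvVowelA ∨
          (a.getD (i-1) ' ' ∈ pvVowelA ∧ b.getD (j-1) ' ' ∈ pvVowelA) then
    pvWriteA ed i j (1 + min (pvReadA ed i (j-1)) (min (pvReadA ed (i-1) j) (pvReadA ed (i-1) (j-1))))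
  else if a.getD (i-1) ' ' ∈ pvVowelA ∧ b.getD (j-1) ' ' ∉ pvVowelA then
    pvWriteA ed i j (1 + min (pvReadA ed i (j-1)) (pvReadA ed (i-1) j))
  else ed  -- no branch fires: edit[i][j] keeps its value (Python assigns nothing)

-- A's inner loop: for j in range(n + 1)
def pvRowA (a b : List Char) (n : Nat) (ed : List (List Int)) (i : Nat) : List (List Int) :=
  (List.range (n+1)).foldl (fun ed j => pvStepA a b ed i j) ed

-- for i in range(m+1) over range-lists of Nat: exact for Python's range(k)
def stringProblem (A : String) (B : String) : Int :=
  let a := A.toList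
  let b := B.toList
  let m := a.length
  let n := b.length
  let edit0 : List (List Int) := List.replicate (m+1) (List.replicate (n+1) (0 : Int))
  let edit := (List.range (m+1)).foldl (pvRowA a b n) edit0
  pvReadA edit m n

-- ===== PORT B =====
-- B's vowels = frozenset('aeiou')
def pvVowelsB : PySem.Set Char := PySem.Set.ofList ['a', 'e', 'i', 'o', 'u']

-- the deps list B builds for a non-base cell (i,j) (both indices ≥ 1)
def pvDepsB (a b : List Char) (i j : Nat) : List (Nat × Nat) :=
  if a.getD (i-1) ' ' = b.getD (j-1) ' ' then [(i-1, j-1)]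
  else if !PySem.Set.contains pvVowelsB (a.getD (i-1) ' ') ||
          PySem.Set.contains pvVowelsB (b.getD (j-1) ' ') then
    [(i, j-1), (i-1, j), (i-1, j-1)]
  else [(i, j-1), (i-1, j)]

-- termination measure for B's while loop (proof device; the Python loop
-- terminates because an unexpanded frame pushes only strictly smaller cells)
def pvMeasure (st : List (Nat × Nat × Bool)) : Nat :=
  (st.map (fun f => if f.2.2 then 1 else 4 ^ (f.1 + f.2.1 + 2))).sum

theorem pvMeasure_cons (f : Nat × Nat × Bool) (s : List (Nat × Nat × Bool)) :
    pvMeasure (f :: s) = (if f.2.2 then 1 else 4 ^ (f.1 + f.2.1 + 2)) + pvMeasure s := by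
  simp [pvMeasure]

theorem pvMeasure_append (l s : List (Nat × Nat × Bool)) :
    pvMeasure (l ++ s) = pvMeasure l + pvMeasure s := by
  simp [pvMeasure]

theorem pvDepsB_sum (a b : List Char) (i j : Nat) (hi : i ≠ 0) (hj : j ≠ 0) :
    ∀ d ∈ pvDepsB a b i j, d.1 + d.2 < i + j := by
  intro d hd
  unfold pvDepsB at hd
  split_ifs at hd <;> fin_cases hd <;> simp <;> omega

theorem pvMeasure_reverse (l : List (Nat × Nat × Bool)) : pvMeasure l.reverse = pvMeasure l := by
  simp [pvMeasure]

theorem pvMeasure_lt_cons (f : Nat × Nat × Bool) (s : List (Nat × Nat × Bool)) :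
    pvMeasure s < pvMeasure (f :: s) := by
  rw [pvMeasure_cons]
  have : 0 < (if f.2.2 then 1 else 4 ^ (f.1 + f.2.1 + 2)) := by split <;> positivity
  omega

theorem pvMeasure_false_le (l : List (Nat × Nat)) (W : Nat)
    (h : ∀ d ∈ l, 4 ^ (d.1 + d.2 + 2) ≤ W) :
    pvMeasure (l.map (fun d => (d.1, d.2, false))) ≤ l.length * W := by
  induction l with
  | nil => simp [pvMeasure]
  | cons d t ih =>
    rw [List.map_cons, pvMeasure_cons]
    simp only [List.length_cons]
    have h1 := h d (List.mem_cons_self ..)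
    have h2 := ih (fun x hx => h x (List.mem_cons_of_mem _ hx))
    calc 4 ^ (d.1 + d.2 + 2) + pvMeasure (t.map (fun d => (d.1, d.2, false)))
        ≤ W + t.length * W := by omega
      _ = (t.length + 1) * W := by ring

theorem pvMeasure_push_lt (a b : List Char) (i j : Nat) (hi : i ≠ 0) (hj : j ≠ 0)
    (memo : PySem.Dict (Nat × Nat) Int) (rest : List (Nat × Nat × Bool)) :
    pvMeasure ((((pvDepsB a b i j).filter (fun d => !memo.contains d)).reverse.map
        (fun d => (d.1, d.2, false))) ++ (i, j, true) :: rest)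
      < pvMeasure ((i, j, false) :: rest) := by
  rw [pvMeasure_append, pvMeasure_cons, pvMeasure_cons, List.map_reverse, pvMeasure_reverse]
  have hlen : ((pvDepsB a b i j).filter (fun d => !memo.contains d)).length ≤ 3 := by
    have h1 : ((pvDepsB a b i j).filter (fun d => !memo.contains d)).length
        ≤ (pvDepsB a b i j).length := List.length_filter_le _ _
    have h2 : (pvDepsB a b i j).length ≤ 3 := by
      unfold pvDepsB; split_ifs <;> simp
    omega
  have hW : ∀ d ∈ (pvDepsB a b i j).filter (fun d => !memo.contains d),
      4 ^ (d.1 + d.2 + 2) ≤ 4 ^ (i + j + 1) := by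
    intro d hd
    have hs := pvDepsB_sum a b i j hi hj d (List.mem_of_mem_filter hd)
    exact Nat.pow_le_pow_right (by omega) (by omega)
  have hb3 : pvMeasure (((pvDepsB a b i j).filter (fun d => !memo.contains d)).map
      (fun d => (d.1, d.2, false))) ≤ 3 * 4 ^ (i + j + 1) :=
    le_trans (pvMeasure_false_le _ _ hW) (Nat.mul_le_mul_right _ hlen)
  have h4 : (1 : Nat) ≤ 4 ^ (i + j + 1) := Nat.one_le_pow _ _ (by omega)
  have he : (4 : Nat) ^ (i + j + 2) = 4 * 4 ^ (i + j + 1) := by ring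
  norm_num
  omega

-- B's while loop: pop a frame; skip if memoized; base cases; an expanded
-- frame combines its (already memoized) deps; an unexpanded frame re-pushes
-- itself expanded plus its not-yet-memoized deps (stack top = list head)
def pvLoopB (a b : List Char) (memo : PySem.Dict (Nat × Nat) Int) :
    List (Nat × Nat × Bool) → PySem.Dict (Nat × Nat) Int
  | [] => memo
  | (i, j, e) :: rest =>
    if memo.contains (i, j) then pvLoopB a b memo rest
    else if i = 0 then pvLoopB a b (memo.insert (i, j) (j : Int)) rest
    else if j = 0 then pvLoopB a b (memo.insert (i, j) (i : Int)) rest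
    else
      let deps := pvDepsB a b i j
      if e then
        -- all deps are memoized here (invariant; Python's memo[d] raises otherwise)
        let v : Int :=
          if a.getD (i-1) ' ' = b.getD (j-1) ' ' then memo.getD (i-1, j-1) 0
          else 1 + (PySem.List.min? (deps.map (fun d => memo.getD d 0)) (fun x => x)).getD 0
        pvLoopB a b (memo.insert (i, j) v) rest
      else
        pvLoopB a b memo (((deps.filter (fun d => !memo.contains d)).reverse.map
          (fun d => (d.1, d.2, false))) ++ (i, j, true) :: rest)
  termination_by st => pvMeasure st
  decreasing_by
  · exact pvMeasure_lt_cons _ _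
  · exact pvMeasure_lt_cons _ _
  · exact pvMeasure_lt_cons _ _
  · exact pvMeasure_lt_cons _ _
  · cases e with
    | false => exact pvMeasure_push_lt a b i j (by assumption) (by assumption) memo rest
    | true => simp_all

def stringProblem_alt (A : String) (B : String) : Int :=
  let a := A.toList
  let b := B.toList
  let m := a.length
  let n := b.length
  let memo := pvLoopB a b PySem.Dict.empty [(m, n, false)]
  -- memo[m, n]: the key is always present when the loop ends (proved below)
  memo.getD (m, n) 0

-- ===== PRECONDITION & SPEC =====
def Spec_stringProblem (A : String) (B : String) (out : Int) : Prop := out = stringProblem_alt A B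
instance (A : String) (B : String) (out : Int) : Decidable (Spec_stringProblem A B out) := by unfold Spec_stringProblem; infer_instance

-- ===== CLAIM (what is proved, stated in full; the proofs are below) =====
def Claim_equal_stringProblem : Prop := ∀ (A : String) (B : String), Dom_stringProblem A B → Spec_stringProblem A B (stringProblem A B)

-- ===== LEMMAS AND PROOFS =====

-- the common recurrence both programs compute (proof-only definition)
def pvEd (a b : List Char) : Nat → Nat → Int
  | 0, j => (j : Int)
  | i+1, 0 => (i : Int) + 1
  | i+1, j+1 =>
    if a.getD i ' ' = b.getD j ' ' then pvEd a b i j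
    else if a.getD i ' ' ∉ pvVowelA ∨ b.getD j ' ' ∈ pvVowelA then
      1 + min (pvEd a b (i+1) j) (min (pvEd a b i (j+1)) (pvEd a b i j))
    else
      1 + min (pvEd a b (i+1) j) (pvEd a b i (j+1))
  termination_by i j => i + j

theorem pvContains (c : Char) : (PySem.Set.contains pvVowelsB c = true) ↔ c ∈ pvVowelA := by
  simp [PySem.Set.contains, pvVowelsB, PySem.Set.ofList, pvVowelA, PySem.Set.add]

-- ---------- B side ----------

theorem pvEd_zero (a b : List Char) (j : Nat) : pvEd a b 0 j = (j : Int) := by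
  simp [pvEd]

theorem pvEd_succ_zero (a b : List Char) (i : Nat) : pvEd a b (i+1) 0 = (i : Int) + 1 := by
  simp [pvEd]

theorem pvEd_succ_succ (a b : List Char) (i j : Nat) :
    pvEd a b (i+1) (j+1) =
      if a.getD i ' ' = b.getD j ' ' then pvEd a b i j
      else if a.getD i ' ' ∉ pvVowelA ∨ b.getD j ' ' ∈ pvVowelA then
        1 + min (pvEd a b (i+1) j) (min (pvEd a b i (j+1)) (pvEd a b i j))
      else
        1 + min (pvEd a b (i+1) j) (pvEd a b i (j+1)) := by
  rw [pvEd]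

def pvMemoOK (a b : List Char) (memo : PySem.Dict (Nat × Nat) Int) : Prop :=
  ∀ p v, memo.get? p = some v → v = pvEd a b p.1 p.2

-- "every expanded frame finds its deps available": K = cells known to be in
-- the memo by the time the frame is reached (grows with each earlier frame)
def pvAvail (a b : List Char) (K : Nat × Nat → Prop) : List (Nat × Nat × Bool) → Prop
  | [] => True
  | (i, j, e) :: rest =>
    (e = true → ∀ d ∈ pvDepsB a b i j, K d) ∧
      pvAvail a b (fun p => K p ∨ p = (i, j)) rest

theorem pvAvail_mono (a b : List Char) (K K' : Nat × Nat → Prop)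
    (h : ∀ p, K p → K' p) :
    ∀ st, pvAvail a b K st → pvAvail a b K' st := by
  intro st
  induction st generalizing K K' with
  | nil => intro _; trivial
  | cons f rest ih =>
    obtain ⟨i, j, e⟩ := f
    intro ⟨h1, h2⟩
    exact ⟨fun he d hd => h d (h1 he d hd),
      ih _ _ (fun p hp => hp.elim (fun hk => Or.inl (h p hk)) Or.inr) h2⟩

theorem pvAvail_build (a b : List Char) :
    ∀ (l : List (Nat × Nat)) (K : Nat × Nat → Prop) (s : List (Nat × Nat × Bool)),
      pvAvail a b (fun p => K p ∨ p ∈ l) s →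
      pvAvail a b K (l.map (fun d => (d.1, d.2, false)) ++ s) := by
  intro l
  induction l with
  | nil =>
    intro K s h
    simpa using pvAvail_mono a b _ K (by simp) s h
  | cons d t ih =>
    intro K s h
    refine ⟨by simp, ?_⟩
    have : pvAvail a b (fun p => (K p ∨ p = (d.1, d.2)) ∨ p ∈ t) s := by
      refine pvAvail_mono a b _ _ ?_ s h
      intro p hp
      rcases hp with hk | hm
      · exact Or.inl (Or.inl hk)
      · rcases List.mem_cons.mp hm with h1 | h1
        · exact Or.inl (Or.inr (by simp [h1]))
        · exact Or.inr h1
    exact ih _ s this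

theorem pvMemoOK_insert (a b : List Char) (memo : PySem.Dict (Nat × Nat) Int)
    (i j : Nat) (v : Int) (hok : pvMemoOK a b memo) (hv : v = pvEd a b i j) :
    pvMemoOK a b (memo.insert (i, j) v) := by
  intro p w hw
  rw [PySem.Dict.get?_insert] at hw
  split at hw
  · rename_i hp
    subst hp
    injection hw with h'
    rw [← h', hv]
  · exact hok p w hw

theorem pvContains_insert_mono (memo : PySem.Dict (Nat × Nat) Int)
    (k : Nat × Nat) (v : Int) (p : Nat × Nat) (h : memo.contains p = true) :
    (memo.insert k v).contains p = true := by
  rw [PySem.Dict.contains_insert]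
  simp [h]

theorem pvContains_insert_self (memo : PySem.Dict (Nat × Nat) Int)
    (k : Nat × Nat) (v : Int) : (memo.insert k v).contains k = true := by
  rw [PySem.Dict.contains_insert]
  simp

theorem pvGetD_ok (a b : List Char) (memo : PySem.Dict (Nat × Nat) Int)
    (hok : pvMemoOK a b memo) (p : Nat × Nat) (hc : memo.contains p = true) :
    memo.getD p 0 = pvEd a b p.1 p.2 := by
  rw [PySem.Dict.contains_eq_isSome_get?] at hc
  obtain ⟨v, hv⟩ := Option.isSome_iff_exists.mp hc
  rw [PySem.Dict.getD_eq_get?_getD, hv]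
  exact hok p v hv

-- the expanded-frame combination computes the recurrence
theorem pvAssign_val (a b : List Char) (memo : PySem.Dict (Nat × Nat) Int)
    (i j : Nat) (hi : i ≠ 0) (hj : j ≠ 0) (hok : pvMemoOK a b memo)
    (hdeps : ∀ d ∈ pvDepsB a b i j, memo.contains d = true) :
    (if a.getD (i-1) ' ' = b.getD (j-1) ' ' then memo.getD (i-1, j-1) 0
     else 1 + (PySem.List.min? ((pvDepsB a b i j).map (fun d => memo.getD d 0))
        (fun x => x)).getD 0) = pvEd a b i j := by
  obtain ⟨i', rfl⟩ : ∃ i', i = i' + 1 := ⟨i - 1, by omega⟩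
  obtain ⟨j', rfl⟩ : ∃ j', j = j' + 1 := ⟨j - 1, by omega⟩
  simp only [Nat.add_sub_cancel] at hdeps ⊢
  rw [pvEd_succ_succ]
  unfold pvDepsB at hdeps ⊢
  simp only [Nat.add_sub_cancel] at hdeps ⊢
  by_cases hc : a.getD i' ' ' = b.getD j' ' '
  · rw [if_pos hc] at hdeps ⊢
    rw [if_pos hc]
    exact pvGetD_ok a b memo hok (i', j') (hdeps _ (by simp))
  · rw [if_neg hc] at hdeps ⊢
    rw [if_neg hc]
    by_cases hv : (!PySem.Set.contains pvVowelsB (a.getD i' ' ') ||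
        PySem.Set.contains pvVowelsB (b.getD j' ' ')) = true
    · rw [if_pos hv] at hdeps ⊢
      have hv' : a.getD i' ' ' ∉ pvVowelA ∨ b.getD j' ' ' ∈ pvVowelA := by
        simpa [pvContains] using hv
      rw [if_pos hv']
      have h1 := pvGetD_ok a b memo hok (i'+1, j') (hdeps _ (by simp))
      have h2 := pvGetD_ok a b memo hok (i', j'+1) (hdeps _ (by simp))
      have h3 := pvGetD_ok a b memo hok (i', j') (hdeps _ (by simp))
      simp only [List.map_cons, List.map_nil, PySem.List.min?_id_cons, List.foldl_cons,
        List.foldl_nil, Option.getD_some, h1, h2, h3]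
      rw [min_assoc, if_neg hc]
    · rw [if_neg hv] at hdeps ⊢
      have hv' : ¬ (a.getD i' ' ' ∉ pvVowelA ∨ b.getD j' ' ' ∈ pvVowelA) := by
        simpa [pvContains] using hv
      rw [if_neg hv']
      have h1 := pvGetD_ok a b memo hok (i'+1, j') (hdeps _ (by simp))
      have h2 := pvGetD_ok a b memo hok (i', j'+1) (hdeps _ (by simp))
      simp only [List.map_cons, List.map_nil, PySem.List.min?_id_cons, List.foldl_cons,
        List.foldl_nil, Option.getD_some, h1, h2]
      rw [if_neg hc]

theorem pvLoopB_inv (a b : List Char) (memo : PySem.Dict (Nat × Nat) Int)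
    (st : List (Nat × Nat × Bool)) (hok : pvMemoOK a b memo)
    (hwf : pvAvail a b (fun p => memo.contains p = true) st) :
    pvMemoOK a b (pvLoopB a b memo st) ∧
    (∀ p, memo.contains p = true → (pvLoopB a b memo st).contains p = true) ∧
    (∀ i j e, (i, j, e) ∈ st → (pvLoopB a b memo st).contains (i, j) = true) := by
  fun_induction pvLoopB a b memo st with
  | case1 memo => exact ⟨hok, fun p h => h, by simp⟩
  | case2 memo i j e rest hc ih =>
    obtain ⟨h1, h2⟩ := hwf
    have hrest : pvAvail a b (fun p => memo.contains p = true) rest :=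
      pvAvail_mono a b _ _ (fun p hp => hp.elim id (fun he => he ▸ hc)) rest h2
    obtain ⟨i1, i2, i3⟩ := ih hok hrest
    refine ⟨i1, i2, ?_⟩
    intro x y e' hm
    rcases List.mem_cons.mp hm with h | h
    · simp only [Prod.mk.injEq] at h
      obtain ⟨rfl, rfl, rfl⟩ := h
      exact i2 _ hc
    · exact i3 x y e' h
  | case3 memo j e rest hc ih =>
    obtain ⟨h1, h2⟩ := hwf
    have hok' := pvMemoOK_insert a b memo 0 j _ hok (pvEd_zero a b j).symm
    have hrest : pvAvail a b (fun p => (memo.insert (0, j) (j : Int)).contains p = true) rest := by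
      refine pvAvail_mono a b _ _ ?_ rest h2
      intro p hp
      rcases hp with hk | rfl
      · exact pvContains_insert_mono _ _ _ _ hk
      · exact pvContains_insert_self _ _ _
    obtain ⟨i1, i2, i3⟩ := ih hok' hrest
    refine ⟨i1, fun p h => i2 p (pvContains_insert_mono _ _ _ _ h), ?_⟩
    intro x y e' hm
    rcases List.mem_cons.mp hm with h | h
    · simp only [Prod.mk.injEq] at h
      obtain ⟨rfl, rfl, rfl⟩ := h
      exact i2 _ (pvContains_insert_self _ _ _)
    · exact i3 x y e' h
  | case4 memo i e rest hi hc ih =>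
    obtain ⟨h1, h2⟩ := hwf
    have hok' : pvMemoOK a b (memo.insert (i, 0) (i : Int)) := by
      refine pvMemoOK_insert a b memo i 0 _ hok ?_
      obtain ⟨i', rfl⟩ : ∃ i', i = i' + 1 := ⟨i - 1, by omega⟩
      rw [pvEd_succ_zero]; push_cast; ring
    have hrest : pvAvail a b (fun p => (memo.insert (i, 0) (i : Int)).contains p = true) rest := by
      refine pvAvail_mono a b _ _ ?_ rest h2
      intro p hp
      rcases hp with hk | rfl
      · exact pvContains_insert_mono _ _ _ _ hk
      · exact pvContains_insert_self _ _ _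
    obtain ⟨i1, i2, i3⟩ := ih hok' hrest
    refine ⟨i1, fun p h => i2 p (pvContains_insert_mono _ _ _ _ h), ?_⟩
    intro x y e' hm
    rcases List.mem_cons.mp hm with h | h
    · simp only [Prod.mk.injEq] at h
      obtain ⟨rfl, rfl, rfl⟩ := h
      exact i2 _ (pvContains_insert_self _ _ _)
    · exact i3 x y e' h
  | case5 memo i j rest hc hi hj deps v ih =>
    obtain ⟨h1, h2⟩ := hwf
    have hv : v = pvEd a b i j := by
      show (if a.getD (i-1) ' ' = b.getD (j-1) ' ' then memo.getD (i-1, j-1) 0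
            else 1 + (PySem.List.min? ((pvDepsB a b i j).map (fun d => memo.getD d 0))
               (fun x => x)).getD 0) = pvEd a b i j
      exact pvAssign_val a b memo i j hi hj hok (h1 rfl)
    have hok' := pvMemoOK_insert a b memo i j v hok hv
    have hrest : pvAvail a b (fun p => (memo.insert (i, j) v).contains p = true) rest := by
      refine pvAvail_mono a b _ _ ?_ rest h2
      intro p hp
      rcases hp with hk | rfl
      · exact pvContains_insert_mono _ _ _ _ hk
      · exact pvContains_insert_self _ _ _
    obtain ⟨i1, i2, i3⟩ := ih hok' hrest
    refine ⟨i1, fun p h => i2 p (pvContains_insert_mono _ _ _ _ h), ?_⟩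
    intro x y e' hm
    rcases List.mem_cons.mp hm with h | h
    · simp only [Prod.mk.injEq] at h
      obtain ⟨rfl, rfl, rfl⟩ := h
      exact i2 _ (pvContains_insert_self _ _ _)
    · exact i3 x y e' h
  | case6 memo i j e rest hc hi hj deps he ih =>
    obtain ⟨h1, h2⟩ := hwf
    have hwf' : pvAvail a b (fun p => memo.contains p = true)
        (((pvDepsB a b i j).filter (fun d => !memo.contains d)).reverse.map
          (fun d => (d.1, d.2, false)) ++ (i, j, true) :: rest) := by
      apply pvAvail_build
      refine ⟨?_, ?_⟩
      · intro _ d hd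
        by_cases hcd : memo.contains d = true
        · exact Or.inl hcd
        · refine Or.inr ?_
          rw [List.mem_reverse, List.mem_filter]
          exact ⟨hd, by simp [hcd]⟩
      · refine pvAvail_mono a b _ _ ?_ rest h2
        intro p hp
        exact hp.elim (fun hk => Or.inl (Or.inl hk)) Or.inr
    obtain ⟨i1, i2, i3⟩ := ih hok hwf'
    refine ⟨i1, i2, ?_⟩
    intro x y e' hm
    rcases List.mem_cons.mp hm with h | h
    · simp only [Prod.mk.injEq] at h
      obtain ⟨rfl, rfl, rfl⟩ := h
      exact i3 x y true (by simp)
    · exact i3 x y e' (by simp [h])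

theorem pvB_eq_ed (A B : String) :
    stringProblem_alt A B = pvEd A.toList B.toList A.toList.length B.toList.length := by
  have hmain : ∀ (a b : List Char),
      (pvLoopB a b (PySem.Dict.empty : PySem.Dict (Nat × Nat) Int) [(a.length, b.length, false)]).getD (a.length, b.length) 0
        = pvEd a b a.length b.length := by
    intro a b
    have hok : pvMemoOK a b (PySem.Dict.empty : PySem.Dict (Nat × Nat) Int) := by
      intro p v hv
      simp [PySem.Dict.get?_empty] at hv
    have hwf : pvAvail a b (fun p => (PySem.Dict.empty : PySem.Dict (Nat × Nat) Int).contains p = true)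
        [(a.length, b.length, false)] := by
      constructor
      · intro h; simp at h
      · trivial
    obtain ⟨i1, _, i3⟩ := pvLoopB_inv a b (PySem.Dict.empty : PySem.Dict (Nat × Nat) Int) _ hok hwf
    exact pvGetD_ok a b _ i1 (a.length, b.length) (i3 a.length b.length false (by simp))
  exact hmain A.toList B.toList

-- ---------- A side ----------

def pvShape (ed : List (List Int)) (m n : Nat) : Prop :=
  ed.length = m+1 ∧ ∀ k, k < m+1 → (ed.getD k []).length = n+1

theorem pvGetD_write (ed : List (List Int)) (i j k : Nat) (v : Int) :
    (pvWriteA ed i j v).getD k [] =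
      if k = i then (ed.getD i []).set j v else ed.getD k [] := by
  by_cases hk : k = i
  · subst hk
    by_cases hi : k < ed.length
    · simp [pvWriteA, List.getD, hi]
    · have : ed.set k ((ed.getD k []).set j v) = ed := by
        apply List.set_eq_of_length_le; omega
      simp only [pvWriteA, this]
      have h1 : ed.getD k [] = [] := by
        simp [List.getD, List.getElem?_eq_none (by omega : ed.length ≤ k)]
      rw [h1]
      simp
  · simp [pvWriteA, List.getD, List.getElem?_set_ne (by omega : i ≠ k), hk]

theorem pvRead_write_self (ed : List (List Int)) (i j : Nat) (v : Int)
    (hi : i < ed.length) (hj : j < (ed.getD i []).length) :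
    pvReadA (pvWriteA ed i j v) i j = v := by
  unfold pvReadA
  rw [pvGetD_write, if_pos rfl]
  simp only [List.getD] at hj ⊢
  simp [List.getElem?_set_self hj]

theorem pvRead_write_ne (ed : List (List Int)) (i j i' j' : Nat) (v : Int)
    (h : i' ≠ i ∨ j' ≠ j) :
    pvReadA (pvWriteA ed i j v) i' j' = pvReadA ed i' j' := by
  unfold pvReadA
  rw [pvGetD_write]
  by_cases hk : i' = i
  · have hj' : j' ≠ j := by tauto
    subst hk
    simp [List.getD, List.getElem?_set_ne (by omega : j ≠ j')]
  · rw [if_neg hk]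

theorem pvShape_write (ed : List (List Int)) (m n i j : Nat) (v : Int)
    (hs : pvShape ed m n) : pvShape (pvWriteA ed i j v) m n := by
  obtain ⟨h1, h2⟩ := hs
  constructor
  · simp [pvWriteA, h1]
  · intro k hk
    rw [pvGetD_write]
    have h3 := h2 k hk
    simp only [List.getD] at h3 ⊢
    by_cases hki : k = i
    · subst hki; simp [h3]
    · simp [hki, h3]

theorem pvStepA_val (a b : List Char) (n i j : Nat) (hj : j ≤ n)
    (ed : List (List Int))
    (hprev : i ≠ 0 → ∀ j', j' ≤ n → pvReadA ed (i-1) j' = pvEd a b (i-1) j')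
    (hrow : ∀ j', j' < j → pvReadA ed i j' = pvEd a b i j') :
    pvStepA a b ed i j = pvWriteA ed i j (pvEd a b i j) := by
  unfold pvStepA
  by_cases hi : i = 0
  · subst hi
    rw [if_pos rfl, pvEd_zero]
  · obtain ⟨i', rfl⟩ : ∃ i', i = i' + 1 := ⟨i - 1, by omega⟩
    rw [if_neg hi]
    by_cases hj0 : j = 0
    · subst hj0
      rw [if_pos rfl, pvEd_succ_zero]
      norm_num
    · obtain ⟨j', rfl⟩ : ∃ j', j = j' + 1 := ⟨j - 1, by omega⟩
      rw [if_neg hj0, pvEd_succ_succ]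
      simp only [Nat.add_sub_cancel] at hprev hrow ⊢
      by_cases hcc : a.getD i' ' ' = b.getD j' ' '
      · rw [if_pos hcc, if_pos hcc, hprev (by omega) j' (by omega)]
      · rw [if_neg hcc, if_neg hcc]
        have e1 : pvReadA ed (i'+1) j' = pvEd a b (i'+1) j' := hrow j' (by omega)
        have e2 : pvReadA ed i' (j'+1) = pvEd a b i' (j'+1) := hprev (by omega) (j'+1) (by omega)
        have e3 : pvReadA ed i' j' = pvEd a b i' j' := hprev (by omega) j' (by omega)
        by_cases hv : a.getD i' ' ' ∉ pvVowelA ∨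
            (a.getD i' ' ' ∈ pvVowelA ∧ b.getD j' ' ' ∈ pvVowelA)
        · have hv' : a.getD i' ' ' ∉ pvVowelA ∨ b.getD j' ' ' ∈ pvVowelA := by tauto
          rw [if_pos hv, if_pos hv', e1, e2, e3]
        · have hv' : ¬ (a.getD i' ' ' ∉ pvVowelA ∨ b.getD j' ' ' ∈ pvVowelA) := by tauto
          have hv2 : a.getD i' ' ' ∈ pvVowelA ∧ b.getD j' ' ' ∉ pvVowelA := by tauto
          rw [if_neg hv, if_neg hv', if_pos hv2, e1, e2]

theorem pvRowA_inv (a b : List Char) (m n i : Nat) (hi : i ≤ m) :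
    ∀ k, k ≤ n + 1 → ∀ ed, pvShape ed m n →
      (∀ i' j', i' < i → j' ≤ n → pvReadA ed i' j' = pvEd a b i' j') →
      pvShape ((List.range k).foldl (fun ed j => pvStepA a b ed i j) ed) m n ∧
      (∀ i' j', i' < i → j' ≤ n →
        pvReadA ((List.range k).foldl (fun ed j => pvStepA a b ed i j) ed) i' j' = pvEd a b i' j') ∧
      (∀ j', j' < k →
        pvReadA ((List.range k).foldl (fun ed j => pvStepA a b ed i j) ed) i j' = pvEd a b i j') := by
  intro k
  induction k with
  | zero =>
    intro _ ed hs hrows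
    simp only [List.range_zero, List.foldl_nil]
    exact ⟨hs, hrows, fun _ h => absurd h (by omega)⟩
  | succ k ih =>
    intro hk ed hs hrows
    obtain ⟨s1, s2, s3⟩ := ih (by omega) ed hs hrows
    rw [List.range_succ, List.foldl_append, List.foldl_cons, List.foldl_nil]
    set edk := (List.range k).foldl (fun ed j => pvStepA a b ed i j) ed with hedk
    have hstep : pvStepA a b edk i k = pvWriteA edk i k (pvEd a b i k) := by
      refine pvStepA_val a b n i k (by omega) edk ?_ ?_
      · intro hi0 j' hj'
        exact s2 (i-1) j' (by omega) hj'
      · intro j' hj'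
        exact s3 j' hj'
    rw [hstep]
    refine ⟨pvShape_write _ _ _ _ _ _ s1, ?_, ?_⟩
    · intro i' j' hi' hj'
      rw [pvRead_write_ne _ _ _ _ _ _ (Or.inl (by omega))]
      exact s2 i' j' hi' hj'
    · intro j' hj'
      by_cases hjk : j' = k
      · subst hjk
        obtain ⟨l1, l2⟩ := s1
        refine pvRead_write_self edk i j' _ (by omega) ?_
        rw [l2 i (by omega)]
        omega
      · rw [pvRead_write_ne _ _ _ _ _ _ (Or.inr hjk)]
        exact s3 j' (by omega)

theorem pvShape_init (m n : Nat) :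
    pvShape (List.replicate (m+1) (List.replicate (n+1) (0 : Int))) m n := by
  constructor
  · simp
  · intro k hk
    simp [List.getD, hk]

theorem pvOuterA_inv (a b : List Char) (m n : Nat) :
    ∀ k, k ≤ m + 1 →
      pvShape ((List.range k).foldl (pvRowA a b n)
        (List.replicate (m+1) (List.replicate (n+1) (0 : Int)))) m n ∧
      (∀ i' j', i' < k → j' ≤ n →
        pvReadA ((List.range k).foldl (pvRowA a b n)
          (List.replicate (m+1) (List.replicate (n+1) (0 : Int)))) i' j' = pvEd a b i' j') := by
  intro k
  induction k with
  | zero =>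
    intro _
    exact ⟨pvShape_init m n, by omega⟩
  | succ k ih =>
    intro hk
    obtain ⟨s1, s2⟩ := ih (by omega)
    rw [List.range_succ, List.foldl_append, List.foldl_cons, List.foldl_nil]
    unfold pvRowA
    obtain ⟨t1, t2, t3⟩ := pvRowA_inv a b m n k (by omega) (n+1) (by omega) _ s1 s2
    refine ⟨t1, ?_⟩
    intro i' j' hi' hj'
    by_cases hik : i' = k
    · subst hik
      exact t3 j' (by omega)
    · exact t2 i' j' (by omega) hj'

theorem pvA_eq_ed (A B : String) :
    stringProblem A B = pvEd A.toList B.toList A.toList.length B.toList.length := by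
  unfold stringProblem
  obtain ⟨_, h2⟩ := pvOuterA_inv A.toList B.toList A.toList.length B.toList.length
    (A.toList.length + 1) (by omega)
  exact h2 A.toList.length B.toList.length (by omega) (by omega)

-- ===== VERDICT (by name: the statement is the Claim_ definition above) =====
theorem stringProblem_spec : Claim_equal_stringProblem := by
  intro A B _
  unfold Spec_stringProblem
  rw [pvA_eq_ed, pvB_eq_ed]
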